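-- pv_equiv track=rewrite | github.com/daeyubkang/BOJ_CODINGTEST | 프로그래머스/3/12987. 숫자 게임/숫자 게임.py | solution
-- ===== SOURCE A (Python) =====
-- def solution(A, B):
--     answer = 0
--     A.sort()
--     B.sort()
--     while B:
--         if A[0] >= B[0]:
--             A.pop()
--             B.pop(0)
--         else:
--             A.pop(0)
--             B.pop(0)
--             answer += 1
--
--     return answer
-- ===== SOURCE B (Python) =====
-- def solution(A, B):
--     A2 = sorted(A)
--     B2 = sorted(B)
--     j = 0
--     for b in B2:
--         if b > A2[j]:
--             j += 1
--     return j
-- ===== Notes on version B (the rewrite author's own statement) =====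
-- stated objective: faster
-- what changed: Replaces the destructive while-loop with list.pop(0)/pop() (each O(n)) by a single forward pass over sorted B with one index pointer into sorted A, no mutation.
import Mathlib
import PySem

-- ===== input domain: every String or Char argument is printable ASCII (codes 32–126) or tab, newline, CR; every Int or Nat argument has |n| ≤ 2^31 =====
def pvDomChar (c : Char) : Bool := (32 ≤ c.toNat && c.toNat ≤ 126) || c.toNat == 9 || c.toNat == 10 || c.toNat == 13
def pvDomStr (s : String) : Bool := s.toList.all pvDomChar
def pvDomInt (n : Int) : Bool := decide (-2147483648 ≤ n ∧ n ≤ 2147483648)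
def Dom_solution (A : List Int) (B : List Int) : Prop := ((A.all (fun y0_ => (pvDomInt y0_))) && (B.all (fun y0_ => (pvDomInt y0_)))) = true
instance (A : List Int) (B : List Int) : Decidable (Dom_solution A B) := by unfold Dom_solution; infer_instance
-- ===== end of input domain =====

-- B replaces A's destructive pop(0)/pop() while-loop by one index pointer walking sorted B (faster, no mutation);
-- A sorts and empties its arguments in place — the equivalence proved here is about the RETURN value only.

-- ===== PORT A =====
-- while B: if A[0] >= B[0]: A.pop(); B.pop(0) else: A.pop(0); B.pop(0); answer += 1
-- (where Python would raise IndexError — A exhausted first, excluded by Pre_ — the recursion returns the accumulator)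
def solutionLoop : List Int → List Int → Int → Int
  | _, [], ans => ans
  | [], _ :: _, ans => ans
  | a0 :: as_, b0 :: bs, ans =>
    if a0 ≥ b0 then solutionLoop ((a0 :: as_).dropLast) bs ans
    else solutionLoop as_ bs (ans + 1)

def solution (A : List Int) (B : List Int) : Int :=
  solutionLoop (PySem.List.sorted A (fun x => x) false) (PySem.List.sorted B (fun x => x) false) 0

-- ===== PORT B =====
-- j = 0; for b in sorted(B): if b > sorted(A)[j]: j += 1; return j
def solution_alt (A : List Int) (B : List Int) : Int :=
  let A2 := PySem.List.sorted A (fun x => x) false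
  let B2 := PySem.List.sorted B (fun x => x) false
  B2.foldl (fun j b => if (PySem.List.pyGet? A2 j).any (fun x => b > x) then j + 1 else j) 0

-- ===== PRECONDITION & SPEC =====
-- A pops one element of A per element of B: it raises IndexError exactly when B is longer than A.
def Pre_solution (A : List Int) (B : List Int) : Prop := B.length ≤ A.length
instance (A : List Int) (B : List Int) : Decidable (Pre_solution A B) := by unfold Pre_solution; infer_instance
def pvWitness_solution : List Int × List Int := ([3, 1, 2], [2, 4])

def Spec_solution (A : List Int) (B : List Int) (out : Int) : Prop := out = solution_alt A B
instance (A : List Int) (B : List Int) (out : Int) : Decidable (Spec_solution A B out) := by unfold Spec_solution; infer_instance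

-- ===== CLAIM (what is proved, stated in full; the proofs are below) =====
def Claim_equal_solution : Prop := ∀ (A : List Int) (B : List Int), Dom_solution A B → Pre_solution A B → Spec_solution A B (solution A B)

-- ===== LEMMAS AND PROOFS =====

-- B's fold over b, reading the fixed full list A2 at index j (the step function of solution_alt).
def altFold (A2 : List Int) (b : List Int) (j : Int) : Int :=
  b.foldl (fun j b => if (PySem.List.pyGet? A2 j).any (fun x => b > x) then j + 1 else j) j

theorem altFold_nil (A2 : List Int) (j : Int) : altFold A2 [] j = j := rfl

theorem altFold_cons (A2 : List Int) (b0 : Int) (bs : List Int) (j : Int) :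
    altFold A2 (b0 :: bs) j =
      altFold A2 bs (if (PySem.List.pyGet? A2 j).any (fun x => b0 > x) then j + 1 else j) := rfl

-- Invariant: A's loop state is the middle segment 'a' of the fixed list u ++ a ++ w, and B's
-- pointer sits at u.length; popping A's last moves an element from 'a' to 'w', counting moves
-- the head of 'a' into 'u' and advances the pointer.
theorem loop_eq_fold (b : List Int) : ∀ (u a w : List Int) (ans : Int),
    b.length ≤ a.length →
    solutionLoop a b ans + (u.length : Int) = ans + altFold (u ++ a ++ w) b (u.length : Int) := by
  induction b with
  | nil =>
    intro u a w ans _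
    simp [solutionLoop, altFold_nil]
  | cons b0 bs ih =>
    intro u a w ans hlen
    match a with
    | [] => simp at hlen
    | a0 :: as_ =>
      have hget : PySem.List.pyGet? (u ++ (a0 :: as_) ++ w) (u.length : Int) = some a0 := by
        simp
      rw [altFold_cons, hget]
      by_cases hc : a0 ≥ b0
      · have hnot : ¬ b0 > a0 := by omega
        simp only [solutionLoop, if_pos hc, Option.any_some, hnot, decide_false, if_neg Bool.false_ne_true]
        have hlast : (a0 :: as_).dropLast ++ ((a0 :: as_).getLast (by simp) :: w) = (a0 :: as_) ++ w := by
          have h1 := List.dropLast_append_getLast (l := a0 :: as_) (by simp)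
          rw [show ((a0 :: as_).getLast (by simp) :: w)
                = [(a0 :: as_).getLast (by simp)] ++ w from rfl,
             ← List.append_assoc, h1]
        have hlen' : bs.length ≤ (a0 :: as_).dropLast.length := by
          simp at hlen ⊢; omega
        have := ih u ((a0 :: as_).dropLast) ((a0 :: as_).getLast (by simp) :: w) ans hlen'
        rw [List.append_assoc, hlast, ← List.append_assoc] at this
        exact this
      · have hgt : b0 > a0 := by omega
        simp only [solutionLoop, if_neg hc, Option.any_some, hgt, decide_true]
        have hlen' : bs.length ≤ as_.length := by simp at hlen; omega
        have := ih (u ++ [a0]) as_ w (ans + 1) hlen'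
        simp only [List.length_append, List.length_cons, List.length_nil] at this ⊢
        push_cast at this ⊢
        have harr : u ++ [a0] ++ as_ ++ w = u ++ (a0 :: as_) ++ w := by simp
        rw [harr] at this
        omega

-- ===== VERDICT (by name: the statement is the Claim_ definition above) =====
theorem solution_spec : Claim_equal_solution := by
  intro A B _ hpre
  unfold Spec_solution solution solution_alt
  have hlen : (PySem.List.sorted B (fun x => x) false).length ≤
      (PySem.List.sorted A (fun x => x) false).length := by
    simpa [PySem.List.length_sorted] using hpre
  have := loop_eq_fold (PySem.List.sorted B (fun x => x) false) []
      (PySem.List.sorted A (fun x => x) false) [] 0 hlen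
  simpa [altFold] using this
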